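-- pv_equiv track=rewrite | github.com/miliar/Code_Jam_Webscraper | solutions_python/Problem_201/482.py | get_free_stalls_around
-- ===== SOURCE A (Python) =====
-- def get_free_stalls_around(free_block_size, n_people):
--     if n_people == 1:
--         return (free_block_size // 2, (free_block_size-1) // 2)
--     if n_people == free_block_size:
--         return (0, 0)
--     if free_block_size % 2 == 1 or (n_people-1) % 2 == 0:
--         return get_free_stalls_around((free_block_size-1) // 2, n_people // 2)
--     return get_free_stalls_around(free_block_size // 2, n_people // 2)
-- ===== SOURCE B (Python) =====
-- def get_free_stalls_around(free_block_size, n_people):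
--     fbs, n = free_block_size, n_people
--     while True:
--         if n == 1:
--             return (fbs // 2, (fbs - 1) // 2)
--         if n == fbs:
--             return (0, 0)
--         if fbs % 2 == 1 or n % 2 == 1:
--             fbs = (fbs - 1) // 2
--         else:
--             fbs = fbs // 2
--         n = n // 2
-- ===== Notes on version B (the rewrite author's own statement) =====
-- stated objective: alternative
-- what changed: The tail recursion is replaced by an explicit while-True loop over the two state variables, with the odd/even test written directly as n % 2 == 1 instead of (n_people-1) % 2 == 0.
import Mathlib
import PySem

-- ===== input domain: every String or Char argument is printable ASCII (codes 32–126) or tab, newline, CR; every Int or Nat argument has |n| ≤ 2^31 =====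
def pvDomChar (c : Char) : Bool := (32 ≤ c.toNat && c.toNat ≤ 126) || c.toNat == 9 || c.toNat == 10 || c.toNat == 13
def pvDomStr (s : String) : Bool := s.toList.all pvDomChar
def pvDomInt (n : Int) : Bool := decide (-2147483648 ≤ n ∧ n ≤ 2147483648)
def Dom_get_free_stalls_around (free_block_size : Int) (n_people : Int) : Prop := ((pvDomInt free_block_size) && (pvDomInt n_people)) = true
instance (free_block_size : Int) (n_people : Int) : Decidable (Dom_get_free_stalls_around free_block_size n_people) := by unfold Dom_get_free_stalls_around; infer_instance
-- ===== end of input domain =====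

-- B rewrites A's tail recursion as an explicit while-loop over the state pair (fbs, n),
-- writing the odd/even test as n % 2 == 1; same recurrence, different decomposition.


-- ===== PORT A =====
-- A's recursion, with a Nat fuel only to make it total in Lean; on Dom ∧ Pre_ the
-- recursion depth is at most 32 (n_people halves each call), so fuel 64 is never exhausted.
def goA : Nat → Int → Int → Int × Int
  | 0, _, _ => (0, 0)   -- fuel exhausted; unreachable on Dom ∧ Pre_
  | fuel+1, fbs, n =>
    if n = 1 then (PySem.Int.floordiv fbs 2, PySem.Int.floordiv (fbs - 1) 2)
    else if n = fbs then (0, 0)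
    else if PySem.Int.mod fbs 2 = 1 ∨ PySem.Int.mod (n - 1) 2 = 0 then
      goA fuel (PySem.Int.floordiv (fbs - 1) 2) (PySem.Int.floordiv n 2)
    else
      goA fuel (PySem.Int.floordiv fbs 2) (PySem.Int.floordiv n 2)

def get_free_stalls_around (free_block_size : Int) (n_people : Int) : Int × Int :=
  goA 64 free_block_size n_people

-- ===== PORT B =====
-- one iteration of B's while-loop body: either a result (return) or the next state
def stallsStep (fbs n : Int) : (Int × Int) ⊕ (Int × Int) :=
  if n = 1 then Sum.inl (PySem.Int.floordiv fbs 2, PySem.Int.floordiv (fbs - 1) 2)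
  else if n = fbs then Sum.inl (0, 0)
  else
    Sum.inr
      (if PySem.Int.mod fbs 2 = 1 ∨ PySem.Int.mod n 2 = 1 then PySem.Int.floordiv (fbs - 1) 2
       else PySem.Int.floordiv fbs 2,
       PySem.Int.floordiv n 2)

-- the while-True loop driver (same fuel bound, unreachable on Dom ∧ Pre_)
def stallsLoop : Nat → Int × Int → Int × Int
  | 0, _ => (0, 0)
  | fuel+1, st =>
    match stallsStep st.1 st.2 with
    | Sum.inl r => r
    | Sum.inr st' => stallsLoop fuel st'

def get_free_stalls_around_alt (free_block_size : Int) (n_people : Int) : Int × Int :=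
  stallsLoop 64 (free_block_size, n_people)

-- ===== PRECONDITION & SPEC =====
-- Pre_ excludes exactly the inputs on which the Python A never returns (infinite
-- recursion): those with n_people ≤ 0 and free_block_size < n_people.
def Pre_get_free_stalls_around (free_block_size : Int) (n_people : Int) : Prop :=
  1 ≤ n_people ∨ n_people ≤ free_block_size
instance (free_block_size : Int) (n_people : Int) : Decidable (Pre_get_free_stalls_around free_block_size n_people) := by unfold Pre_get_free_stalls_around; infer_instance
def pvWitness_get_free_stalls_around : Int × Int := (8, 3)

def Spec_get_free_stalls_around (free_block_size : Int) (n_people : Int) (out : Int × Int) : Prop := out = get_free_stalls_around_alt free_block_size n_people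
instance (free_block_size : Int) (n_people : Int) (out : Int × Int) : Decidable (Spec_get_free_stalls_around free_block_size n_people out) := by unfold Spec_get_free_stalls_around; infer_instance

-- ===== CLAIM (what is proved, stated in full; the proofs are below) =====
def Claim_equal_get_free_stalls_around : Prop := ∀ (free_block_size : Int) (n_people : Int), Dom_get_free_stalls_around free_block_size n_people → Pre_get_free_stalls_around free_block_size n_people → Spec_get_free_stalls_around free_block_size n_people (get_free_stalls_around free_block_size n_people)

-- ===== LEMMAS AND PROOFS =====

-- A's branch test 'fbs odd or (n-1) even' equals B's 'fbs odd or n odd' (Python %, divisor 2)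
theorem stalls_cond_iff (fbs n : Int) :
    (PySem.Int.mod fbs 2 = 1 ∨ PySem.Int.mod (n - 1) 2 = 0) ↔
    (PySem.Int.mod fbs 2 = 1 ∨ PySem.Int.mod n 2 = 1) := by
  simp only [PySem.Int.mod_eq_emod_of_pos (by omega : (0:Int) < 2)]
  omega

theorem stallsLoop_eq_goA (fuel : Nat) (fbs n : Int) :
    stallsLoop fuel (fbs, n) = goA fuel fbs n := by
  induction fuel generalizing fbs n with
  | zero => rfl
  | succ fuel ih =>
    simp only [stallsLoop, goA, stallsStep]
    by_cases h1 : n = 1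
    · rw [if_pos h1, if_pos h1]
    · rw [if_neg h1, if_neg h1]
      by_cases h2 : n = fbs
      · rw [if_pos h2, if_pos h2]
      · rw [if_neg h2, if_neg h2]
        by_cases h3 : PySem.Int.mod fbs 2 = 1 ∨ PySem.Int.mod n 2 = 1
        · rw [if_pos h3, if_pos ((stalls_cond_iff fbs n).mpr h3)]
          exact ih _ _
        · rw [if_neg h3, if_neg (fun h => h3 ((stalls_cond_iff fbs n).mp h))]
          exact ih _ _

-- ===== VERDICT (by name: the statement is the Claim_ definition above) =====
theorem get_free_stalls_around_spec : Claim_equal_get_free_stalls_around := by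
  intro fbs n _ _
  unfold Spec_get_free_stalls_around get_free_stalls_around get_free_stalls_around_alt
  exact (stallsLoop_eq_goA 64 fbs n).symm
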